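-- pv_equiv track=rewrite | github.com/LK-Tmac1/GameofYouThrones | spark/transform.py | transformActivityAccuSum
-- ===== SOURCE A (Python) =====
-- def transformActivityAccuSum(useractivityList, hourly=False):
--     """
--     # Each element: tuple of (useractivity:rowkey:timestamp, count)
--     # Daily sample: (userview:channelid:videoid:2015-09-28, 200)
--     # Hourly sample: (userview:channelid:videoid:2015-09-28T12:30, 200)
--     Use bucket, i.e. a list of dictionary to compute accumulative sums.
--     Return a list of tuple: key and the accumulative sum
--     """
--     aggreVideoStat = []
--     if isinstance(useractivityList, list):
--         accuBucket = {}
--         for useractivity in useractivityList: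
--             bucketKey = useractivity[0]
--             bucketKey = bucketKey[0:bucketKey.rfind(':')]
--             if hourly:
--                 # Further split the time to hour level
--                 bucketKey = bucketKey[0:bucketKey.rfind(':')]
--             if bucketKey not in accuBucket:
--                 accuBucket[bucketKey] = []
--             accuBucket[bucketKey].append(useractivity)
--         for bucketKey, useractivityList in accuBucket.items():
--             count = 0
--             # Calculate the accumulative sum backwards
--             for useractivity in useractivityList:
--                 count = count + int(useractivity[1])
--                 aggreVideoStat.append((useractivity[0], count))
--     return aggreVideoStat
-- ===== SOURCE B (Python) =====
-- def transformActivityAccuSum(useractivityList, hourly=False):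
--     """Dict-free re-implementation: precompute each row's bucket key once,
--     then for each first-occurrence key scan the key list and emit that
--     bucket's running sums directly, with a plain `seen` list instead of a
--     dict of buckets."""
--     aggreVideoStat = []
--     if not isinstance(useractivityList, list):
--         return aggreVideoStat
--     keys = []
--     for useractivity in useractivityList:
--         k = useractivity[0]
--         k = k[0:k.rfind(':')]
--         if hourly:
--             k = k[0:k.rfind(':')]
--         keys.append(k)
--     seen = []
--     for k in keys:
--         if k in seen:
--             continue
--         seen.append(k)
--         total = 0
--         for useractivity, kk in zip(useractivityList, keys):
--             if kk == k:
--                 total = total + int(useractivity[1])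
--                 aggreVideoStat.append((useractivity[0], total))
--     return aggreVideoStat
-- ===== Notes on version B (the rewrite author's own statement) =====
-- stated objective: alternative
-- what changed: A groups rows into a dict of bucket lists and then runs a second accumulation pass over the dict; B uses no dict at all: it precomputes the key of every row, and for each first-occurrence key rescans the key list emitting that bucket's running sums directly, tracking distinct keys with a plain seen list.
import Mathlib
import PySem

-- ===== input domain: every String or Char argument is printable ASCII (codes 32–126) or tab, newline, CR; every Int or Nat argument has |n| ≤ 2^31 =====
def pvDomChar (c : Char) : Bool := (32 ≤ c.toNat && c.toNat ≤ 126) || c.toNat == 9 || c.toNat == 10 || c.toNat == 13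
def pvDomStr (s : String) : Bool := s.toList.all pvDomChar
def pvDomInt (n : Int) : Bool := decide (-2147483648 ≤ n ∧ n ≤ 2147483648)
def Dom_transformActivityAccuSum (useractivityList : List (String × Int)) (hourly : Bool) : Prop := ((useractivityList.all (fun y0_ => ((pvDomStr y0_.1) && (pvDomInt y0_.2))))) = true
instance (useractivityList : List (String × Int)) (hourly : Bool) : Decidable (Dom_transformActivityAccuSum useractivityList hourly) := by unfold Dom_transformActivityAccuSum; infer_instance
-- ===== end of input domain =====

-- B replaces A's dict-of-buckets-plus-second-pass with a dict-free algorithm: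
-- precompute every row's key, then for each first-occurrence key rescan the key
-- list emitting that bucket's running sums directly (objective: alternative).

-- ===== PORT A =====
-- A's two-phase algorithm: group rows into a dict of bucket lists (insertion
-- order), then a second pass computes each bucket's accumulative sums.
-- (the Python `isinstance(useractivityList, list)` guard is always true under the type convention)
def transformActivityAccuSum (useractivityList : List (String × Int)) (hourly : Bool) : List (String × Int) :=
  let accuBucket : PySem.Dict String (List (String × Int)) :=
    useractivityList.foldl (fun accuBucket useractivity =>
      let bucketKey := useractivity.1
      let bucketKey := PySem.Str.slice bucketKey (some 0) (some (PySem.Str.rfind bucketKey ":"))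
      let bucketKey := if hourly then
          PySem.Str.slice bucketKey (some 0) (some (PySem.Str.rfind bucketKey ":"))
        else bucketKey
      let accuBucket := if accuBucket.contains bucketKey then accuBucket
        else accuBucket.insert bucketKey []
      accuBucket.modify bucketKey [] (fun l => l ++ [useractivity])) PySem.Dict.empty
  accuBucket.items.foldl (fun aggreVideoStat kv =>
    (kv.2.foldl (fun (st : List (String × Int) × Int) useractivity =>
      (st.1 ++ [(useractivity.1, st.2 + useractivity.2)], st.2 + useractivity.2)) (aggreVideoStat, 0)).1) []

-- ===== PORT B =====
-- B: no dict. `keys` is the per-row bucket key; for each key not yet in the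
-- plain `seen` list, rescan `zip useractivityList keys` and emit the running
-- sums of that bucket online.
def transformActivityAccuSum_alt (useractivityList : List (String × Int)) (hourly : Bool) : List (String × Int) :=
  let keys : List String := useractivityList.foldl (fun ks useractivity =>
    let k := PySem.Str.slice useractivity.1 (some 0) (some (PySem.Str.rfind useractivity.1 ":"))
    let k := if hourly then PySem.Str.slice k (some 0) (some (PySem.Str.rfind k ":")) else k
    ks ++ [k]) []
  (keys.foldl (fun (st : List (String × Int) × List String) k =>
    if k ∈ st.2 then st
    else
      let seen := st.2 ++ [k]
      let inner := (useractivityList.zip keys).foldl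
        (fun (p : List (String × Int) × Int) uk =>
          if uk.2 == k then (p.1 ++ [(uk.1.1, p.2 + uk.1.2)], p.2 + uk.1.2) else p)
        (st.1, 0)
      (inner.1, seen)) ([], [])).1

-- ===== PRECONDITION & SPEC =====
def Spec_transformActivityAccuSum (useractivityList : List (String × Int)) (hourly : Bool) (out : List (String × Int)) : Prop := out = transformActivityAccuSum_alt useractivityList hourly
instance (useractivityList : List (String × Int)) (hourly : Bool) (out : List (String × Int)) : Decidable (Spec_transformActivityAccuSum useractivityList hourly out) := by unfold Spec_transformActivityAccuSum; infer_instance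

-- ===== CLAIM =====
def Claim_equal_transformActivityAccuSum : Prop := ∀ (useractivityList : List (String × Int)) (hourly : Bool), Dom_transformActivityAccuSum useractivityList hourly → Spec_transformActivityAccuSum useractivityList hourly (transformActivityAccuSum useractivityList hourly)

-- ===== LEMMAS AND PROOFS =====

-- the shared bucket-key computation
def pKey (hourly : Bool) (s : String) : String :=
  let b := PySem.Str.slice s (some 0) (some (PySem.Str.rfind s ":"))
  if hourly then PySem.Str.slice b (some 0) (some (PySem.Str.rfind b ":")) else b

-- A's grouping step, named
def pAstep (hourly : Bool) (d : PySem.Dict String (List (String × Int))) (ua : String × Int) :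
    PySem.Dict String (List (String × Int)) :=
  let k := pKey hourly ua.1
  (if d.contains k then d else d.insert k []).modify k [] (fun l => l ++ [ua])

-- B's outer step, named
def pBstep (l : List (String × Int)) (keys : List String)
    (st : List (String × Int) × List String) (k : String) :
    List (String × Int) × List String :=
  if k ∈ st.2 then st
  else
    ((( (l.zip keys).foldl
        (fun (p : List (String × Int) × Int) uk =>
          if uk.2 == k then (p.1 ++ [(uk.1.1, p.2 + uk.1.2)], p.2 + uk.1.2) else p)
        (st.1, 0))).1, st.2 ++ [k])

-- first-occurrence key list (dict insertion order = B's `seen` list order)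
def pFK (seen : List String) (ks : List String) : List String :=
  ks.foldl (fun acc k => if k ∈ acc then acc else acc ++ [k]) seen

-- the keys a run of B's outer loop adds beyond `seen`
def pNew (seen : List String) : List String → List String
  | [] => []
  | k :: t => if k ∈ seen then pNew seen t else k :: pNew (seen ++ [k]) t

-- the bucket of key k
def pG (hourly : Bool) (l : List (String × Int)) (k : String) : List (String × Int) :=
  l.filter (fun ua => pKey hourly ua.1 == k)

-- accumulative sums of a bucket, starting from c
def pvScan (c : Int) : List (String × Int) → List (String × Int)
  | [] => []
  | a :: t => (a.1, c + a.2) :: pvScan (c + a.2) t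

theorem portA_eq (l : List (String × Int)) (hourly : Bool) :
    transformActivityAccuSum l hourly
      = (l.foldl (pAstep hourly) PySem.Dict.empty).items.foldl (fun acc kv =>
          (kv.2.foldl (fun (st : List (String × Int) × Int) ua =>
            (st.1 ++ [(ua.1, st.2 + ua.2)], st.2 + ua.2)) (acc, 0)).1) [] := rfl

theorem portB_eq (l : List (String × Int)) (hourly : Bool) :
    transformActivityAccuSum_alt l hourly
      = ((l.foldl (fun ks ua => ks ++ [pKey hourly ua.1]) []).foldl
          (pBstep l (l.foldl (fun ks ua => ks ++ [pKey hourly ua.1]) [])) ([], [])).1 := rfl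

theorem keysB_eq (l : List (String × Int)) (hourly : Bool) :
    l.foldl (fun ks ua => ks ++ [pKey hourly ua.1]) [] = l.map (fun ua => pKey hourly ua.1) := by
  suffices h : ∀ acc : List String,
      l.foldl (fun ks ua => ks ++ [pKey hourly ua.1]) acc = acc ++ l.map (fun ua => pKey hourly ua.1) by
    simpa using h []
  induction l with
  | nil => simp
  | cons x t ih => intro acc; simp [ih]

theorem mem_pFK (seen ks : List String) (k : String) :
    k ∈ pFK seen ks ↔ k ∈ seen ∨ k ∈ ks := by
  induction ks generalizing seen with
  | nil => simp [pFK]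
  | cons x t ih =>
      show k ∈ pFK (if x ∈ seen then seen else seen ++ [x]) t ↔ _
      by_cases hx : x ∈ seen
      · simp only [hx, if_pos, ih]
        constructor
        · rintro (h | h) <;> simp [h]
        · rintro (h | h)
          · exact Or.inl h
          · rcases List.mem_cons.mp h with h | h
            · exact Or.inl (h ▸ hx)
            · exact Or.inr h
      · simp only [hx, if_neg, not_false_iff, ih, List.mem_append, List.mem_cons]
        tauto

theorem pFK_append (seen ks : List String) (k : String) :
    pFK seen (ks ++ [k]) = if k ∈ pFK seen ks then pFK seen ks else pFK seen ks ++ [k] := by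
  simp [pFK, List.foldl_append]

theorem nodup_pFK (seen ks : List String) (h : seen.Nodup) : (pFK seen ks).Nodup := by
  induction ks generalizing seen with
  | nil => exact h
  | cons x t ih =>
      show (pFK (if x ∈ seen then seen else seen ++ [x]) t).Nodup
      by_cases hx : x ∈ seen
      · simpa [hx] using ih seen h
      · rw [if_neg hx]
        refine ih (seen ++ [x]) ?_
        simp only [List.nodup_append, List.nodup_singleton, true_and]
        refine ⟨h, ?_⟩
        intro a ha b hb
        simp only [List.mem_singleton] at hb
        subst hb
        exact fun he => hx (he ▸ ha)

theorem pFK_eq_append_pNew (ks : List String) : ∀ seen, pFK seen ks = seen ++ pNew seen ks := by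
  induction ks with
  | nil => intro seen; simp [pFK, pNew]
  | cons x t ih =>
      intro seen
      show pFK (if x ∈ seen then seen else seen ++ [x]) t = _
      by_cases hx : x ∈ seen
      · simpa [hx, pNew] using ih seen
      · have := ih (seen ++ [x])
        simp only [hx, if_neg, not_false_iff, pNew]
        simpa [pFK] using this

-- A's phase 1, characterised: insertion-ordered distinct keys with their buckets
theorem itemsA (hourly : Bool) (l : List (String × Int)) :
    (l.foldl (pAstep hourly) PySem.Dict.empty).items
      = (pFK [] (l.map (fun ua => pKey hourly ua.1))).map (fun k => (k, pG hourly l k)) := by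
  induction l using List.reverseRecOn with
  | nil => rfl
  | append_singleton l x ih =>
      rw [List.foldl_append, List.foldl_cons, List.foldl_nil]
      set d := l.foldl (pAstep hourly) PySem.Dict.empty with hd
      set ks := l.map (fun ua => pKey hourly ua.1) with hks
      set k := pKey hourly x.1 with hkk
      have hkeys : d.keys = pFK [] ks := by
        simp only [PySem.Dict.keys, ih, List.map_map]
        simp [Function.comp_def]
      have hnd : d.keys.Nodup := by rw [hkeys]; exact nodup_pFK [] ks (by simp)
      have hcont : d.contains k = decide (k ∈ pFK [] ks) := by
        rw [PySem.Dict.contains_eq_decide_mem_keys, hkeys]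
      have hmapkey : (l ++ [x]).map (fun ua => pKey hourly ua.1) = ks ++ [k] := by
        simp [hks, hkk]
      rw [hmapkey, pFK_append]
      by_cases hk : k ∈ pFK [] ks
      · have hcontT : d.contains k = true := by rw [hcont]; simpa using hk
        have hmem : (k, pG hourly l k) ∈ d.items := by
          rw [ih]; exact List.mem_map_of_mem hk
        have hgd : d.getD k [] = pG hourly l k :=
          PySem.Dict.getD_of_mem_items _ hmem hnd []
        show (pAstep hourly d x).items = _
        simp only [pAstep, ← hkk, hcontT, if_pos, PySem.Dict.modify, hgd]
        rw [PySem.Dict.items_insert_of_contains d _ hcontT, if_pos hk, ih, List.map_map]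
        apply List.map_congr_left
        intro k' hk'
        by_cases h : k' = k
        · subst h
          simp [pG, List.filter_append, ← hkk]
        · have hbeq : (k' == k) = false := by simpa using h
          simp only [Function.comp_def, hbeq, Bool.false_eq_true, if_neg, not_false_iff]
          have : pG hourly (l ++ [x]) k' = pG hourly l k' := by
            have hx : (pKey hourly x.1 == k') = false := by
              rw [← hkk]; simpa using fun he => h he.symm
            simp [pG, List.filter_append, hx]
          rw [this]
      · have hcontF : d.contains k = false := by rw [hcont]; simpa using hk
        have hknotks : k ∉ ks := fun hmem => hk ((mem_pFK [] ks k).mpr (Or.inr hmem))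
        show (pAstep hourly d x).items = _
        simp only [pAstep, ← hkk, hcontF, Bool.false_eq_true, if_neg, not_false_iff,
          PySem.Dict.modify]
        rw [PySem.Dict.getD_insert_self, PySem.Dict.insert_insert_self,
          PySem.Dict.items_insert_of_not_contains d _ hcontF, if_neg hk, ih,
          List.map_append]
        congr 1
        · apply List.map_congr_left
          intro k' hk'
          have h : k' ≠ k := fun he => hk (he ▸ hk')
          have hx : (pKey hourly x.1 == k') = false := by
            rw [← hkk]; simpa using fun he => h he.symm
          simp [pG, List.filter_append, hx]
        · have hGk : pG hourly l k = [] := by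
            apply List.filter_eq_nil_iff.mpr
            intro ua hua hbe
            exact hknotks (by
              have : pKey hourly ua.1 = k := by simpa using hbe
              exact this ▸ List.mem_map_of_mem hua)
          simp [pG, List.filter_append, ← hkk]
          simp [pG] at hGk
          simpa using hGk

-- A's inner accumulation fold / B's inner rescan fold, characterised
def pvSum (l : List (String × Int)) : Int := (l.map (·.2)).sum

theorem pvInnerA (l : List (String × Int)) (acc : List (String × Int)) (c : Int) :
    l.foldl (fun (st : List (String × Int) × Int) ua =>
      (st.1 ++ [(ua.1, st.2 + ua.2)], st.2 + ua.2)) (acc, c)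
      = (acc ++ pvScan c l, c + pvSum l) := by
  induction l generalizing acc c with
  | nil => simp [pvScan, pvSum]
  | cons x t ih =>
      simp only [List.foldl_cons, ih, pvScan, pvSum, List.map_cons, List.sum_cons]
      rw [Prod.mk.injEq]
      constructor
      · simp
      · ring

theorem pvInnerB (hourly : Bool) (l : List (String × Int)) (k : String)
    (acc : List (String × Int)) :
    ((l.zip (l.map (fun ua => pKey hourly ua.1))).foldl
      (fun (p : List (String × Int) × Int) uk =>
        if uk.2 == k then (p.1 ++ [(uk.1.1, p.2 + uk.1.2)], p.2 + uk.1.2) else p)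
      (acc, 0)).1 = acc ++ pvScan 0 (pG hourly l k) := by
  suffices h : ∀ (z : List ((String × Int) × String)) (acc : List (String × Int)) (c : Int),
      z.foldl (fun (p : List (String × Int) × Int) uk =>
        if uk.2 == k then (p.1 ++ [(uk.1.1, p.2 + uk.1.2)], p.2 + uk.1.2) else p) (acc, c)
        = (acc ++ pvScan c ((z.filter (fun uk => uk.2 == k)).map (·.1)),
           c + pvSum ((z.filter (fun uk => uk.2 == k)).map (·.1))) by
    have hz : l.zip (l.map (fun ua => pKey hourly ua.1))
        = l.map (fun ua => (ua, pKey hourly ua.1)) := by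
      induction l with
      | nil => rfl
      | cons x t ihl => simp [ihl]
    rw [hz, h]
    simp [pG, List.filter_map, Function.comp_def]
  intro z
  induction z with
  | nil => intro acc c; simp [pvScan, pvSum]
  | cons u t ih =>
      intro acc c
      by_cases hu : (u.2 == k) = true
      · have hf : List.filter (fun uk => uk.2 == k) (u :: t)
            = u :: List.filter (fun uk => uk.2 == k) t := List.filter_cons_of_pos hu
        simp only [List.foldl_cons, hu, if_pos, ih, hf, List.map_cons, pvScan, pvSum,
          List.sum_cons]
        rw [Prod.mk.injEq]
        constructor
        · simp
        · ring
      · have hf : List.filter (fun uk => uk.2 == k) (u :: t)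
            = List.filter (fun uk => uk.2 == k) t := List.filter_cons_of_neg (by simpa using hu)
        simp only [List.foldl_cons, hu, if_neg, Bool.false_eq_true, not_false_iff, ih, hf]

-- B's outer loop, characterised
theorem outerB (hourly : Bool) (l : List (String × Int)) (ks : List String)
    (acc : List (String × Int)) (seen : List String) :
    (ks.foldl (pBstep l (l.map (fun ua => pKey hourly ua.1))) (acc, seen)).1
      = acc ++ ((pNew seen ks).map (fun k => pvScan 0 (pG hourly l k))).flatten := by
  induction ks generalizing acc seen with
  | nil => simp [pNew]
  | cons x t ih =>
      by_cases hx : x ∈ seen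
      · simp only [List.foldl_cons, pBstep, hx, if_pos, pNew, ih]
      · simp only [List.foldl_cons, pBstep, hx, if_neg, not_false_iff, pNew]
        rw [ih, pvInnerB]
        simp

-- A's phase 2 flattens the per-bucket accumulative sums
theorem pvPhase2A (items : List (String × List (String × Int))) (acc : List (String × Int)) :
    items.foldl (fun acc kv =>
      (kv.2.foldl (fun (st : List (String × Int) × Int) ua =>
        (st.1 ++ [(ua.1, st.2 + ua.2)], st.2 + ua.2)) (acc, 0)).1) acc
      = acc ++ (items.map (fun kv => pvScan 0 kv.2)).flatten := by
  have hfun : (fun (acc : List (String × Int)) (kv : String × List (String × Int)) =>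
      (kv.2.foldl (fun (st : List (String × Int) × Int) ua =>
        (st.1 ++ [(ua.1, st.2 + ua.2)], st.2 + ua.2)) (acc, 0)).1)
      = fun acc kv => acc ++ pvScan 0 kv.2 := by
    funext acc kv; rw [pvInnerA]
  rw [hfun]
  induction items generalizing acc with
  | nil => simp
  | cons kv t ih => simp [ih]

-- ===== VERDICT =====
theorem transformActivityAccuSum_spec : Claim_equal_transformActivityAccuSum := by
  intro l hourly _
  show transformActivityAccuSum l hourly = transformActivityAccuSum_alt l hourly
  rw [portA_eq, portB_eq, keysB_eq, itemsA, pvPhase2A, outerB]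
  have h := pFK_eq_append_pNew (l.map (fun ua => pKey hourly ua.1)) []
  simp only [List.nil_append] at h
  rw [← h, List.map_map]
  rfl
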